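-- pv_equiv track=rewrite | github.com/Ridealist/CodingTest | CodingTest_문제풀이/탐욕법/구명보트.py | solution
-- ===== SOURCE A (Python) =====
-- def solution(people, limit):
--     visited = [False]*len(people)
--     cnt = 0
--     for i in range(len(people)):
--         if visited[i] is True:
--             continue
--         visited[i] = True
--         temp_max = 0
--         m_idx = None
--         for j in range(i+1, len(people)):
--             if visited[j] is True:
--                 continue
--             if people[j] > temp_max and limit-people[i] >= people[j]:
--                 temp_max = people[j]
--                 m_idx = j
--         if m_idx:
--             visited[m_idx] = True
--         cnt += 1
--     return cnt
-- ===== SOURCE B (Python) =====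
-- def _find(live, people, w, i, lo, hi):
--     # lower-bound binary search for key (w, -i) in live (sorted by (people[j], -j))
--     if lo >= hi:
--         return lo
--     mid = (lo + hi) // 2
--     j = live[mid]
--     if (people[j], -j) < (w, -i):
--         return _find(live, people, w, i, mid + 1, hi)
--     return _find(live, people, w, i, lo, mid)
--
--
-- def _count_le(live, people, cap, lo, hi):
--     # number of elements of live (weight-sorted) whose weight is <= cap
--     if lo >= hi:
--         return lo
--     mid = (lo + hi) // 2
--     if people[live[mid]] <= cap:
--         return _count_le(live, people, cap, mid + 1, hi)
--     return _count_le(live, people, cap, lo, mid)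
--
--
-- def solution(people, limit):
--     n = len(people)
--     # positive-weight indices, sorted by (weight asc, index desc): the last
--     # element with weight <= cap is the heaviest fitting one, earliest index.
--     live = sorted((j for j in range(n) if people[j] > 0),
--                   key=lambda j: (people[j], -j))
--     cnt = 0
--     for i in range(n):
--         w = people[i]
--         if w > 0:
--             k = _find(live, people, w, i, 0, len(live))
--             if k >= len(live) or live[k] != i:
--                 continue          # i was already taken aboard as a partner
--             live.pop(k)
--         p = _count_le(live, people, limit - w, 0, len(live))
--         if p:
--             live.pop(p - 1)       # heaviest fitting partner, earliest index
--         cnt += 1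
--     return cnt
-- ===== Notes on version B (the rewrite author's own statement) =====
-- stated objective: faster
-- what changed: A pairs each leader with the heaviest fitting remaining person by an O(n) rescan inside the outer loop; B pre-sorts the positive weights by (weight, -index) once and replaces the whole inner scan by binary searches on that sorted list (the last element with weight <= capacity IS the heaviest fitting partner with the earliest index), popping taken people from the list.
import Mathlib
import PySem

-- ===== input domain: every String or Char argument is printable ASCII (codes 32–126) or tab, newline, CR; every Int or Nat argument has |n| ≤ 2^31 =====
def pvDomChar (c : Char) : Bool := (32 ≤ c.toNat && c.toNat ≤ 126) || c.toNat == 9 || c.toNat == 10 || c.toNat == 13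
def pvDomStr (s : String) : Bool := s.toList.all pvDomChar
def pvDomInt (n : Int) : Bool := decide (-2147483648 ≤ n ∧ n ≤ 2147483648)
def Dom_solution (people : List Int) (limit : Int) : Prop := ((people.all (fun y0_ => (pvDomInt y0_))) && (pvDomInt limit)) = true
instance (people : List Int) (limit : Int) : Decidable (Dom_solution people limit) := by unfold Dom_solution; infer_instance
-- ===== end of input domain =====

-- B replaces A's O(n^2) inner rescans by one (weight, -index) sort plus binary searches
-- (objective: faster; the greedy pairing itself — heaviest fitting partner, earliest
-- index on ties — is unchanged and that is what the equivalence proof establishes).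

-- ===== PORT A =====
-- inner scan: for j in range(i+1, n): heaviest fitting unvisited person, first index kept
def solA_inner (people : List Int) (limit : Int) (visited : List Bool) (i n : Int) :
    Int × Option Int :=
  (PySem.List.pyRange (i + 1) n 1).foldl
    (fun (t : Int × Option Int) j =>
      if PySem.List.pyGetD visited j false = true then t
      else if PySem.List.pyGetD people j 0 > t.1 ∧
              limit - PySem.List.pyGetD people i 0 ≥ PySem.List.pyGetD people j 0 then
        (PySem.List.pyGetD people j 0, some j)
      else t)
    (0, none)

-- one iteration of A's outer loop (st = (visited, cnt))
def solA_step (people : List Int) (limit : Int) (st : List Bool × Int) (i : Int) :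
    List Bool × Int :=
  if PySem.List.pyGetD st.1 i false = true then st
  else
    let visited := PySem.List.pySetD st.1 i true
    let r := solA_inner people limit visited i (people.length : Int)
    let visited2 :=
      match r.2 with
      | some m => if m ≠ 0 then PySem.List.pySetD visited m true else visited
      | none => visited
    (visited2, st.2 + 1)

def solution (people : List Int) (limit : Int) : Int :=
  ((PySem.List.pyRange 0 (people.length : Int) 1).foldl (solA_step people limit)
    (List.replicate people.length false, 0)).2

-- ===== PORT B =====
-- lower-bound binary search for the lexicographic key (w, -i) in live, which is
-- sorted by (people[j], -j); Python's tuple comparison is written out componentwise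
def solB_find (live people : List Int) (w i lo hi : Int) : Int :=
  if h : lo < hi then
    let mid := PySem.Int.floordiv (lo + hi) 2
    let j := PySem.List.pyGetD live mid 0
    if PySem.List.pyGetD people j 0 < w ∨
       (PySem.List.pyGetD people j 0 = w ∧ -j < -i) then
      solB_find live people w i (mid + 1) hi
    else
      solB_find live people w i lo mid
  else lo
termination_by (hi - lo).toNat
decreasing_by
  · have h1 := PySem.Int.floordiv_two_mid_bounds (le_of_lt h)
    omega
  · have h2 : PySem.Int.floordiv (lo + hi) 2 < hi := by
      rw [PySem.Int.floordiv_lt_iff_lt_mul (by omega)]; omega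
    omega

-- number of elements of live (weight-sorted) whose weight is ≤ cap
def solB_countLe (live people : List Int) (cap lo hi : Int) : Int :=
  if h : lo < hi then
    let mid := PySem.Int.floordiv (lo + hi) 2
    if PySem.List.pyGetD people (PySem.List.pyGetD live mid 0) 0 ≤ cap then
      solB_countLe live people cap (mid + 1) hi
    else
      solB_countLe live people cap lo mid
  else lo
termination_by (hi - lo).toNat
decreasing_by
  · have h1 := PySem.Int.floordiv_two_mid_bounds (le_of_lt h)
    omega
  · have h2 : PySem.Int.floordiv (lo + hi) 2 < hi := by
      rw [PySem.Int.floordiv_lt_iff_lt_mul (by omega)]; omega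
    omega

-- live.pop(k) (k is in range on every executed path)
def solB_pop (xs : List Int) (k : Int) : List Int :=
  ((PySem.List.pop? xs k).map (fun r => r.2)).getD xs

-- one boat for the current leader of weight w: pop the heaviest fitting partner, if any
def solB_boat (people : List Int) (limit w : Int) (live : List Int) (cnt : Int) :
    List Int × Int :=
  let p := solB_countLe live people (limit - w) 0 (live.length : Int)
  (if p ≠ 0 then solB_pop live (p - 1) else live, cnt + 1)

-- one iteration of B's outer loop (st = (live, cnt))
def solB_step (people : List Int) (limit : Int) (st : List Int × Int) (i : Int) :
    List Int × Int :=
  let w := PySem.List.pyGetD people i 0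
  if 0 < w then
    let k := solB_find st.1 people w i 0 (st.1.length : Int)
    if k < (st.1.length : Int) ∧ PySem.List.pyGetD st.1 k 0 = i then
      solB_boat people limit w (solB_pop st.1 k) st.2
    else st
  else solB_boat people limit w st.1 st.2

def solution_alt (people : List Int) (limit : Int) : Int :=
  let n : Int := (people.length : Int)
  let live0 := PySem.List.sorted2
    ((PySem.List.pyRange 0 n 1).filter (fun j => 0 < PySem.List.pyGetD people j 0))
    (fun j => PySem.List.pyGetD people j 0) (fun j => -j)
  ((PySem.List.pyRange 0 n 1).foldl (solB_step people limit) (live0, 0)).2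

-- ===== PRECONDITION & SPEC =====
def Spec_solution (people : List Int) (limit : Int) (out : Int) : Prop := out = solution_alt people limit
instance (people : List Int) (limit : Int) (out : Int) : Decidable (Spec_solution people limit out) := by unfold Spec_solution; infer_instance

-- ===== CLAIM (what is proved, stated in full; the proofs are below) =====
def Claim_equal_solution : Prop := ∀ (people : List Int) (limit : Int), Dom_solution people limit → Spec_solution people limit (solution people limit)

-- ===== LEMMAS AND PROOFS =====

-- the weight of person j (people[j] as both ports read it)
def pvW (people : List Int) (j : Int) : Int := PySem.List.pyGetD people j 0

-- the strict order live is sorted by: weight ascending, index descending on ties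
def pvKeyLt (people : List Int) (a b : Int) : Prop :=
  pvW people a < pvW people b ∨ (pvW people a = pvW people b ∧ b < a)

-- the element-wise test solB_find's search is the boundary of
def pvLtT (people : List Int) (w i j : Int) : Prop :=
  pvW people j < w ∨ (pvW people j = w ∧ -j < -i)

-- the coupling invariant before outer iteration i
def pvInv (people : List Int) (i : Int) (visited : List Bool) (live : List Int) : Prop :=
  visited.length = people.length ∧
  live.Pairwise (pvKeyLt people) ∧
  (∀ j : Int, j ∈ live ↔
    (0 ≤ j ∧ j < (people.length : Int) ∧ 0 < pvW people j ∧
     PySem.List.pyGetD visited j false = false)) ∧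
  (∀ j : Int, 0 ≤ j → j < i → PySem.List.pyGetD visited j false = true) ∧
  (∀ j : Int, i ≤ j → PySem.List.pyGetD visited j false = true → 0 < pvW people j)

-- a valid partner candidate for leader i, as A's inner scan tests it
def pvOk (people : List Int) (limit : Int) (visited : List Bool) (i j : Int) : Prop :=
  PySem.List.pyGetD visited j false = false ∧ 0 < pvW people j ∧
  pvW people j ≤ limit - pvW people i

-- characterisation of A's inner accumulator after scanning range(i+1, b)
def pvBest (people : List Int) (limit : Int) (visited : List Bool) (i b : Int)
    (t : Int × Option Int) : Prop :=
  (t.2 = none ∧ t.1 = 0 ∧ ∀ j, i + 1 ≤ j → j < b → ¬ pvOk people limit visited i j) ∨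
  (∃ js, t.2 = some js ∧ i + 1 ≤ js ∧ js < b ∧ pvOk people limit visited i js ∧
    t.1 = pvW people js ∧
    (∀ j, i + 1 ≤ j → j < b → pvOk people limit visited i j → pvW people j ≤ t.1) ∧
    (∀ j, i + 1 ≤ j → j < b → pvOk people limit visited i j → pvW people j = t.1 → js ≤ j))

-- ---- small utilities ----

theorem pv_getD_all_eq {α : Type} (xs : List α) (d : α) (j : Int)
    (h : ∀ x ∈ xs, x = d) : PySem.List.pyGetD xs j d = d := by
  unfold PySem.List.pyGetD
  cases hg : PySem.List.pyGet? xs j with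
  | none => rfl
  | some x => exact h x (PySem.List.mem_of_pyGet?_eq_some xs hg)

theorem pv_getD_setD {α : Type} (xs : List α) (m : Int) (v d : α)
    (h0 : 0 ≤ m) (hm : m < (xs.length : Int)) (j : Int) (hj : 0 ≤ j) :
    PySem.List.pyGetD (PySem.List.pySetD xs m v) j d =
      if j = m then v else PySem.List.pyGetD xs j d := by
  rw [PySem.List.pySetD_of_nonneg xs v h0,
      PySem.List.pyGetD_of_nonneg _ d hj, PySem.List.pyGetD_of_nonneg xs d hj]
  simp only [List.getD, List.getElem?_set]
  split_ifs with h1 h2 h3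
  all_goals (try rfl)
  all_goals omega

theorem pv_getD_nat (xs : List Int) (q : Nat) (hq : q < xs.length) :
    PySem.List.pyGetD xs (q : Int) 0 = xs[q] := by
  rw [PySem.List.pyGetD_natCast]
  exact List.getD_eq_getElem xs 0 hq

theorem pv_pop_eraseIdx (xs : List Int) (k : Int) (h0 : 0 ≤ k)
    (hk : k < (xs.length : Int)) : solB_pop xs k = xs.eraseIdx k.toNat := by
  have hkn : k.toNat < xs.length := by omega
  have h : (k.toNat : Int) = k := by omega
  unfold solB_pop
  rw [← h, PySem.List.pop?_natCast xs k.toNat hkn]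
  simp
  congr 1
  omega

theorem pv_mem_eraseIdx {α : Type} (xs : List α) (hn : xs.Nodup) (t : Nat)
    (ht : t < xs.length) (y : α) :
    y ∈ xs.eraseIdx t ↔ (y ∈ xs ∧ y ≠ xs[t]) := by
  rw [List.eraseIdx_eq_take_drop_succ]
  have hx : xs = xs.take t ++ xs[t] :: xs.drop (t+1) := by
    conv_lhs => rw [← List.take_append_drop t xs]
    congr 1
    rw [List.drop_eq_getElem_cons ht]
  constructor
  · intro hy
    rcases List.mem_append.mp hy with h | h
    · have hyx : y ∈ xs := List.mem_of_mem_take h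
      refine ⟨hyx, ?_⟩
      intro he
      rw [hx] at hn
      rcases List.nodup_append.mp hn with ⟨_, _, hdisj⟩
      exact hdisj y h _ List.mem_cons_self he
    · have hyx : y ∈ xs := List.mem_of_mem_drop h
      refine ⟨hyx, ?_⟩
      intro he
      rw [hx] at hn
      rcases List.nodup_append.mp hn with ⟨_, hcons, hdisj⟩
      have h2 := (List.nodup_cons.mp hcons).1
      exact h2 (he ▸ h)
  · rintro ⟨hy, hne⟩
    rw [hx] at hy
    rcases List.mem_append.mp hy with h | h
    · exact List.mem_append.mpr (Or.inl h)
    · rcases List.mem_cons.mp h with h | h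
      · exact absurd h hne
      · exact List.mem_append.mpr (Or.inr h)

theorem pv_nodup_of_pairwise (people : List Int) (live : List Int)
    (hp : live.Pairwise (pvKeyLt people)) : live.Nodup := by
  refine hp.imp ?_
  intro a b h
  rcases h with h | ⟨_, h⟩ <;> intro he <;> subst he <;> omega

theorem pv_pairwise_getElem (people : List Int) (live : List Int)
    (hp : live.Pairwise (pvKeyLt people)) (q r : Nat) (hq : q < live.length)
    (hr : r < live.length) (hlt : q < r) : pvKeyLt people live[q] live[r] :=
  List.pairwise_iff_getElem.mp hp q r hq hr hlt

theorem solB_find_spec (live people : List Int) (w i : Int)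
    (hp : live.Pairwise (pvKeyLt people)) :
    ∀ (fuel : Nat) (lo hi : Int), (hi - lo).toNat = fuel → 0 ≤ lo → lo ≤ hi →
    hi ≤ (live.length : Int) →
    (∀ q : Nat, (q : Int) < lo → (hq : q < live.length) → pvLtT people w i live[q]) →
    (∀ r : Nat, hi ≤ (r : Int) → (hr : r < live.length) → ¬ pvLtT people w i live[r]) →
    0 ≤ solB_find live people w i lo hi ∧
    solB_find live people w i lo hi ≤ (live.length : Int) ∧
    (∀ q : Nat, (hq : q < live.length) →
      (pvLtT people w i live[q] ↔ (q : Int) < solB_find live people w i lo hi)) := by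
  have mono : ∀ (q r : Nat), q ≤ r → (hr : r < live.length) → (hq : q < live.length) →
      pvLtT people w i live[r] → pvLtT people w i live[q] := by
    intro q r hqr hr hq hlt
    rcases Nat.eq_or_lt_of_le hqr with he | hlt2
    · subst he; exact hlt
    · have hk := pv_pairwise_getElem people live hp q r hq hr hlt2
      unfold pvKeyLt at hk; unfold pvLtT at *
      rcases hk with hk | hk <;> rcases hlt with hl | hl <;> omega
  intro fuel
  induction fuel using Nat.strong_induction_on with
  | _ fuel IH =>
    intro lo hi hfuel h0 hlh hhl hpre hsuf
    by_cases h : lo < hi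
    · rw [solB_find, dif_pos h]
      have hmb : lo ≤ PySem.Int.floordiv (lo + hi) 2 ∧
          PySem.Int.floordiv (lo + hi) 2 < hi :=
        ⟨(PySem.Int.floordiv_two_mid_bounds (le_of_lt h)).1, by
          rw [PySem.Int.floordiv_lt_iff_lt_mul (by omega)]; omega⟩
      set mid := PySem.Int.floordiv (lo + hi) 2 with hmiddef
      have hmn : mid.toNat < live.length := by omega
      have hjv : PySem.List.pyGetD live mid 0 = live[mid.toNat] := by
        rw [PySem.List.pyGetD_of_nonneg live 0 (by omega : (0:Int) ≤ mid)]
        exact List.getD_eq_getElem live 0 hmn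
      dsimp only
      rw [hjv]
      split_ifs with hcc
      · have hcc' : pvLtT people w i live[mid.toNat] := hcc
        refine IH (hi - (mid + 1)).toNat (by omega) (mid + 1) hi rfl (by omega)
          (by omega) hhl ?_ hsuf
        intro q hq hql
        by_cases hqlo : (q : Int) < lo
        · exact hpre q hqlo hql
        · exact mono q mid.toNat (by omega) hmn hql hcc'
      · have hcc' : ¬ pvLtT people w i live[mid.toNat] := hcc
        refine IH (mid - lo).toNat (by omega) lo mid rfl h0 (by omega)
          (by omega) hpre ?_
        intro r hr hrl hlt
        exact hcc' (mono mid.toNat r (by omega) hrl hmn hlt)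
    · rw [solB_find, dif_neg h]
      refine ⟨by omega, by omega, ?_⟩
      intro q hq
      constructor
      · intro hlt
        by_contra hq2
        exact hsuf q (by omega) hq hlt
      · intro hql
        exact hpre q hql hq

theorem solB_countLe_spec (live people : List Int) (cap : Int)
    (hp : live.Pairwise (pvKeyLt people)) :
    ∀ (fuel : Nat) (lo hi : Int), (hi - lo).toNat = fuel → 0 ≤ lo → lo ≤ hi →
    hi ≤ (live.length : Int) →
    (∀ q : Nat, (q : Int) < lo → (hq : q < live.length) → pvW people live[q] ≤ cap) →
    (∀ r : Nat, hi ≤ (r : Int) → (hr : r < live.length) → ¬ pvW people live[r] ≤ cap) →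
    0 ≤ solB_countLe live people cap lo hi ∧
    solB_countLe live people cap lo hi ≤ (live.length : Int) ∧
    (∀ q : Nat, (hq : q < live.length) →
      (pvW people live[q] ≤ cap ↔ (q : Int) < solB_countLe live people cap lo hi)) := by
  have mono : ∀ (q r : Nat), q ≤ r → (hr : r < live.length) → (hq : q < live.length) →
      pvW people live[r] ≤ cap → pvW people live[q] ≤ cap := by
    intro q r hqr hr hq hlt
    rcases Nat.eq_or_lt_of_le hqr with he | hlt2
    · subst he; exact hlt
    · have hk := pv_pairwise_getElem people live hp q r hq hr hlt2
      unfold pvKeyLt at hk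
      rcases hk with hk | hk <;> omega
  intro fuel
  induction fuel using Nat.strong_induction_on with
  | _ fuel IH =>
    intro lo hi hfuel h0 hlh hhl hpre hsuf
    by_cases h : lo < hi
    · rw [solB_countLe, dif_pos h]
      have hmb : lo ≤ PySem.Int.floordiv (lo + hi) 2 ∧
          PySem.Int.floordiv (lo + hi) 2 < hi :=
        ⟨(PySem.Int.floordiv_two_mid_bounds (le_of_lt h)).1, by
          rw [PySem.Int.floordiv_lt_iff_lt_mul (by omega)]; omega⟩
      set mid := PySem.Int.floordiv (lo + hi) 2 with hmiddef
      have hmn : mid.toNat < live.length := by omega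
      have hjv : PySem.List.pyGetD live mid 0 = live[mid.toNat] := by
        rw [PySem.List.pyGetD_of_nonneg live 0 (by omega : (0:Int) ≤ mid)]
        exact List.getD_eq_getElem live 0 hmn
      dsimp only
      rw [hjv]
      split_ifs with hcc
      · have hcc' : pvW people live[mid.toNat] ≤ cap := hcc
        refine IH (hi - (mid + 1)).toNat (by omega) (mid + 1) hi rfl (by omega)
          (by omega) hhl ?_ hsuf
        intro q hq hql
        by_cases hqlo : (q : Int) < lo
        · exact hpre q hqlo hql
        · exact mono q mid.toNat (by omega) hmn hql hcc'
      · have hcc' : ¬ pvW people live[mid.toNat] ≤ cap := hcc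
        refine IH (mid - lo).toNat (by omega) lo mid rfl h0 (by omega)
          (by omega) hpre ?_
        intro r hr hrl hlt
        exact hcc' (mono mid.toNat r (by omega) hrl hmn hlt)
    · rw [solB_countLe, dif_neg h]
      refine ⟨by omega, by omega, ?_⟩
      intro q hq
      constructor
      · intro hlt
        by_contra hq2
        exact hsuf q (by omega) hq hlt
      · intro hql
        exact hpre q hql hq

-- ---- A's inner scan is the first-index argmax of the candidates ----

theorem pvBest_zero_le (people : List Int) (limit : Int) (visited : List Bool)
    (i b : Int) (t : Int × Option Int) (ht : pvBest people limit visited i b t) :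
    0 ≤ t.1 := by
  rcases ht with ⟨_, h, _⟩ | ⟨js, _, _, _, hok, h1, _, _⟩
  · omega
  · rcases hok with ⟨_, h2, _⟩; omega

theorem pvBest_max (people : List Int) (limit : Int) (visited : List Bool)
    (i b : Int) (t : Int × Option Int) (ht : pvBest people limit visited i b t)
    (j : Int) (hja : i + 1 ≤ j) (hjb : j < b)
    (hok : pvOk people limit visited i j) : pvW people j ≤ t.1 := by
  rcases ht with ⟨_, _, hall⟩ | ⟨js, _, _, _, _, _, hmax, _⟩
  · exact absurd hok (hall j hja hjb)
  · exact hmax j hja hjb hok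

theorem pvBest_step (people : List Int) (limit : Int) (visited : List Bool)
    (i b : Int) (hib : i + 1 ≤ b) (t : Int × Option Int)
    (ht : pvBest people limit visited i b t) :
    pvBest people limit visited i (b + 1)
      (if PySem.List.pyGetD visited b false = true then t
       else if PySem.List.pyGetD people b 0 > t.1 ∧
               limit - PySem.List.pyGetD people i 0 ≥ PySem.List.pyGetD people b 0 then
         (PySem.List.pyGetD people b 0, some b)
       else t) := by
  have ht0 := pvBest_zero_le people limit visited i b t ht
  split_ifs with h1 h2
  · -- b is already seated: not a candidate
    rcases ht with ⟨hn, hz, hall⟩ | ⟨js, hs, hj1, hj2, hok, he, hmax, hfirst⟩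
    · refine Or.inl ⟨hn, hz, ?_⟩
      intro j hja hjb hok
      rcases eq_or_lt_of_le (show j ≤ b by omega) with he | hlt
      · exact absurd hok.1 (by rw [he] at *; simp [h1])
      · exact hall j hja (by omega) hok
    · refine Or.inr ⟨js, hs, hj1, by omega, hok, he, ?_, ?_⟩
      · intro j hja hjb hokj
        rcases eq_or_lt_of_le (show j ≤ b by omega) with hej | hlt
        · exact absurd hokj.1 (by rw [hej] at *; simp [h1])
        · exact hmax j hja (by omega) hokj
      · intro j hja hjb hokj heq
        rcases eq_or_lt_of_le (show j ≤ b by omega) with hej | hlt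
        · exact absurd hokj.1 (by rw [hej] at *; simp [h1])
        · exact hfirst j hja (by omega) hokj heq
  · -- b is a strictly better candidate: it becomes the running best
    have hv : PySem.List.pyGetD visited b false = false := by
      cases hvb : PySem.List.pyGetD visited b false
      · rfl
      · exact absurd hvb h1
    have hokb : pvOk people limit visited i b := ⟨hv, by unfold pvW; omega, by unfold pvW; omega⟩
    refine Or.inr ⟨b, rfl, hib, by omega, hokb, rfl, ?_, ?_⟩
    · intro j hja hjb hokj
      rcases eq_or_lt_of_le (show j ≤ b by omega) with hej | hlt
      · subst hej; unfold pvW; simp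
      · have := pvBest_max people limit visited i b t ht j hja hlt hokj
        unfold pvW at *; omega
    · intro j hja hjb hokj heq
      rcases eq_or_lt_of_le (show j ≤ b by omega) with hej | hlt
      · omega
      · have := pvBest_max people limit visited i b t ht j hja hlt hokj
        unfold pvW at *; omega
  · -- b does not improve the best
    rcases ht with ⟨hn, hz, hall⟩ | ⟨js, hs, hj1, hj2, hok, he, hmax, hfirst⟩
    · refine Or.inl ⟨hn, hz, ?_⟩
      intro j hja hjb hokj
      rcases eq_or_lt_of_le (show j ≤ b by omega) with hej | hlt
      · subst hej
        rcases hokj with ⟨_, hp1, hp2⟩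
        unfold pvW at hp1 hp2; omega
      · exact hall j hja (by omega) hokj
    · refine Or.inr ⟨js, hs, hj1, by omega, hok, he, ?_, ?_⟩
      · intro j hja hjb hokj
        rcases eq_or_lt_of_le (show j ≤ b by omega) with hej | hlt
        · subst hej
          rcases hokj with ⟨_, hp1, hp2⟩
          unfold pvW at *; omega
        · exact hmax j hja (by omega) hokj
      · intro j hja hjb hokj heq
        rcases eq_or_lt_of_le (show j ≤ b by omega) with hej | hlt
        · omega
        · exact hfirst j hja (by omega) hokj heq

theorem solA_inner_best (people : List Int) (limit : Int) (visited : List Bool)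
    (i : Int) :
    ∀ (fuel : Nat) (b : Int), (b - (i + 1)).toNat = fuel → i + 1 ≤ b →
    pvBest people limit visited i b
      ((PySem.List.pyRange (i + 1) b 1).foldl
        (fun (t : Int × Option Int) j =>
          if PySem.List.pyGetD visited j false = true then t
          else if PySem.List.pyGetD people j 0 > t.1 ∧
                  limit - PySem.List.pyGetD people i 0 ≥ PySem.List.pyGetD people j 0 then
            (PySem.List.pyGetD people j 0, some j)
          else t)
        (0, none)) := by
  intro fuel
  induction fuel with
  | zero =>
    intro b hb hib
    have : b = i + 1 := by omega
    subst this
    rw [PySem.List.pyRange_one_eq_nil (by omega)]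
    exact Or.inl ⟨rfl, rfl, by intro j h1 h2 _; omega⟩
  | succ fuel IH =>
    intro b hb hib
    have hb1 : i + 1 ≤ b - 1 := by omega
    have hsplit : b = (b - 1) + 1 := by omega
    rw [hsplit, PySem.List.pyRange_one_succ_right hb1, List.foldl_append]
    simp only [List.foldl_cons, List.foldl_nil]
    exact pvBest_step people limit visited i (b - 1) hb1 _
      (IH (b - 1) (by omega) hb1)

-- ---- the partner both sides select is the same ----

-- mid-step state: i already seated (visited), i not in live1, everything < i+1 visited
theorem pv_partner (people : List Int) (limit i : Int) (visited' : List Bool)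
    (live1 : List Int)
    (h0 : 0 ≤ i) (hn : i < (people.length : Int))
    (hlen : visited'.length = people.length)
    (hpair : live1.Pairwise (pvKeyLt people))
    (hmem : ∀ j : Int, j ∈ live1 ↔
      (0 ≤ j ∧ j < (people.length : Int) ∧ 0 < pvW people j ∧
       PySem.List.pyGetD visited' j false = false))
    (hpre : ∀ j : Int, 0 ≤ j → j < i + 1 → PySem.List.pyGetD visited' j false = true) :
    let p := solB_countLe live1 people (limit - pvW people i) 0 (live1.length : Int)
    let r := solA_inner people limit visited' i (people.length : Int)
    0 ≤ p ∧ p ≤ (live1.length : Int) ∧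
    (p = 0 → r.2 = none) ∧
    (p ≠ 0 → ∃ (t : Nat) (ht : t < live1.length), (t : Int) = p - 1 ∧
      r.2 = some live1[t] ∧ i < live1[t]) := by
  intro p r
  have hgt : ∀ j : Int, j ∈ live1 → i < j := by
    intro j hj
    have h1 := (hmem j).mp hj
    by_contra hle
    have := hpre j h1.1 (by omega)
    rw [h1.2.2.2] at this
    exact Bool.false_ne_true this
  have hcnt := solB_countLe_spec live1 people (limit - pvW people i) hpair
    ((live1.length : Int) - 0).toNat 0 (live1.length : Int) rfl (by omega) (by omega)
    (by omega) (by omega) (by intro r hr1 hr2; omega)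
  obtain ⟨hp0, hpl, hiff⟩ := hcnt
  have hbest : pvBest people limit visited' i (people.length : Int) r := by
    show pvBest people limit visited' i (people.length : Int)
      (solA_inner people limit visited' i (people.length : Int))
    unfold solA_inner
    exact solA_inner_best people limit visited' i
      (((people.length : Int) - (i + 1)).toNat) (people.length : Int) rfl (by omega)
  have hOkMem : ∀ j : Int, i + 1 ≤ j → j < (people.length : Int) →
      (pvOk people limit visited' i j ↔
        (j ∈ live1 ∧ pvW people j ≤ limit - pvW people i)) := by
    intro j h1 h2
    constructor
    · rintro ⟨hv, hpos, hle⟩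
      exact ⟨(hmem j).mpr ⟨by omega, h2, hpos, hv⟩, hle⟩
    · rintro ⟨hm, hle⟩
      have h3 := (hmem j).mp hm
      exact ⟨h3.2.2.2, h3.2.2.1, hle⟩
  refine ⟨hp0, hpl, ?_, ?_⟩
  · -- no fitting partner
    intro hpz
    rcases hbest with ⟨hnone, _, _⟩ | ⟨js, hs, hj1, hj2, hok, _, _, _⟩
    · exact hnone
    · exfalso
      obtain ⟨hm, hle⟩ := (hOkMem js hj1 hj2).mp hok
      obtain ⟨u, hu, hju⟩ := List.getElem_of_mem hm
      have := (hiff u hu).mp (by rw [hju]; exact hle)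
      omega
  · -- the partner is live1[p-1]
    intro hpz
    have ht : (p - 1).toNat < live1.length := by omega
    set t := (p - 1).toNat with htdef
    have htp : (t : Int) = p - 1 := by omega
    have hmemt : live1[t] ∈ live1 := List.getElem_mem ht
    have hgtt := hgt _ hmemt
    have hboundt := (hmem _).mp hmemt
    have hlet : pvW people live1[t] ≤ limit - pvW people i :=
      (hiff t ht).mpr (by omega)
    have hokt : pvOk people limit visited' i live1[t] :=
      (hOkMem _ (by omega) hboundt.2.1).mpr ⟨hmemt, hlet⟩
    rcases hbest with ⟨_, _, hall⟩ | ⟨js, hs, hj1, hj2, hok, he, hmax, hfirst⟩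
    · exact absurd hokt (hall _ (by omega) hboundt.2.1)
    · obtain ⟨hm, hle⟩ := (hOkMem js hj1 hj2).mp hok
      obtain ⟨u, hu, hju⟩ := List.getElem_of_mem hm
      have hup : (u : Int) < p := (hiff u hu).mp (by rw [hju]; exact hle)
      have hjseq : js = live1[t] := by
        rcases Nat.lt_or_ge u t with hlt | hge
        · exfalso
          have hk := pv_pairwise_getElem people live1 hpair u t hu ht hlt
          rw [hju] at hk
          have hmx := hmax _ (by omega) hboundt.2.1 hokt
          rw [he] at hmx
          rcases hk with hk | ⟨hk1, hk2⟩
          · omega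
          · have hfs := hfirst _ (by omega) hboundt.2.1 hokt (by omega)
            omega
        · have hut : u = t := by omega
          subst hut
          exact hju.symm
      exact ⟨t, ht, htp, by rw [hs, hjseq], hgtt⟩

-- ---- initial state ----

theorem pv_sorted2_lex (xs : List Int) (k1 k2 : Int → Int) :
    PySem.List.sorted2 xs k1 k2 =
    PySem.List.sorted xs (fun a => toLex (k1 a, k2 a)) := by
  unfold PySem.List.sorted2 PySem.List.sorted
  dsimp only
  have hb : (fun (a b : Int) =>
      decide (k1 a < k1 b) || !decide (k1 b < k1 a) && decide (k2 a < k2 b)) =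
      (fun a b => decide (toLex (k1 a, k2 a) < toLex (k1 b, k2 b))) := by
    funext a b
    simp only [Prod.Lex.toLex_lt_toLex]
    by_cases h1 : k1 a < k1 b <;> by_cases h2 : k1 b < k1 a <;>
      by_cases h3 : k2 a < k2 b <;> simp [h1, h2, h3] <;> omega
  rw [hb]
  simp

theorem pv_init (people : List Int) :
    pvInv people 0 (List.replicate people.length false)
      (PySem.List.sorted2
        ((PySem.List.pyRange 0 (people.length : Int) 1).filter
          (fun j => 0 < PySem.List.pyGetD people j 0))
        (fun j => PySem.List.pyGetD people j 0) (fun j => -j)) := by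
  set base := (PySem.List.pyRange 0 (people.length : Int) 1).filter
    (fun j => 0 < PySem.List.pyGetD people j 0) with hbase
  rw [pv_sorted2_lex]
  set live0 := PySem.List.sorted base
    (fun a => toLex (PySem.List.pyGetD people a 0, -a)) with hlive
  have hperm : live0.Perm base := PySem.List.sorted_perm base _ false
  have hvf : ∀ (j : Int),
      PySem.List.pyGetD (List.replicate people.length false) j false = false := by
    intro j
    exact pv_getD_all_eq _ _ _ (by intro x hx; exact List.eq_of_mem_replicate hx)
  have hnodup : live0.Nodup :=
    hperm.nodup_iff.mpr ((PySem.List.nodup_pyRange_one 0 (people.length : Int)).filter _)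
  have hpairle := PySem.List.sorted_pairwise base
    (fun a => toLex (PySem.List.pyGetD people a 0, -a))
  refine ⟨by simp, ?_, ?_, ?_, ?_⟩
  · -- strict pairwise order
    have hand := List.Pairwise.and hpairle hnodup
    refine hand.imp ?_
    rintro a b ⟨hle, hne⟩
    have hlt : toLex ((PySem.List.pyGetD people a 0 : Int), -a) <
        toLex ((PySem.List.pyGetD people b 0 : Int), -b) := by
      rcases lt_or_eq_of_le hle with h | h
      · exact h
      · exfalso
        have h2 := congrArg (fun x => (ofLex x).2) h
        simp at h2
        exact hne (by omega)
    rw [Prod.Lex.toLex_lt_toLex] at hlt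
    unfold pvKeyLt pvW
    rcases hlt with h | ⟨h1, h2⟩
    · exact Or.inl h
    · exact Or.inr ⟨h1, by omega⟩
  · -- membership characterisation
    intro j
    rw [hperm.mem_iff, hbase, List.mem_filter, PySem.List.mem_pyRange_one]
    unfold pvW
    constructor
    · rintro ⟨⟨h1, h2⟩, h3⟩
      exact ⟨h1, h2, by simpa using h3, hvf j⟩
    · rintro ⟨h1, h2, h3, _⟩
      exact ⟨⟨h1, h2⟩, by simpa using h3⟩
  · intro j h1 h2; omega
  · intro j _ hv
    rw [hvf j] at hv
    exact absurd hv Bool.false_ne_true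

-- ---- one coupled outer step ----

theorem pv_getD_elem {α : Type} (xs : List α) (d : α) (k : Int) (h0 : 0 ≤ k)
    (hk : k < (xs.length : Int)) :
    PySem.List.pyGetD xs k d = xs[k.toNat]'(by omega) := by
  rw [PySem.List.pyGetD_of_nonneg xs d h0]
  exact List.getD_eq_getElem xs d (by omega)

theorem pv_find_locates (people live : List Int) (i : Int)
    (hpair : live.Pairwise (pvKeyLt people)) (hmemi : i ∈ live) :
    ∃ (u : Nat) (hu : u < live.length),
      (u : Int) = solB_find live people (PySem.List.pyGetD people i 0) i 0
        (live.length : Int) ∧ live[u] = i := by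
  obtain ⟨hk0, hkl, hkiff⟩ := solB_find_spec live people
    (PySem.List.pyGetD people i 0) i hpair ((live.length : Int) - 0).toNat 0
    (live.length : Int) rfl (by omega) (by omega) (by omega)
    (by intro q hq hql; omega) (by intro r h1 h2; omega)
  set k := solB_find live people (PySem.List.pyGetD people i 0) i 0
    (live.length : Int) with hkdef
  obtain ⟨u, hu, hju⟩ := List.getElem_of_mem hmemi
  have hnot : ¬ pvLtT people (PySem.List.pyGetD people i 0) i live[u] := by
    rw [hju]; unfold pvLtT pvW; omega
  have hku : k ≤ (u : Int) := by
    by_contra hc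
    exact hnot ((hkiff u hu).mpr (by omega))
  rcases eq_or_lt_of_le hku with he | hlt
  · exact ⟨u, hu, he.symm, hju⟩
  · exfalso
    have hkn : k.toNat < live.length := by omega
    have hkey := pv_pairwise_getElem people live hpair k.toNat u hkn hu (by omega)
    rw [hju] at hkey
    have hltk : pvLtT people (PySem.List.pyGetD people i 0) i live[k.toNat] := by
      unfold pvKeyLt pvW at hkey; unfold pvLtT pvW; omega
    have := (hkiff k.toNat hkn).mp hltk
    omega

theorem pv_boat (people : List Int) (limit i : Int) (visited' : List Bool)
    (live1 : List Int) (cnt : Int) (h0 : 0 ≤ i) (hn : i < (people.length : Int))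
    (hlen' : visited'.length = people.length)
    (hpair1 : live1.Pairwise (pvKeyLt people))
    (hmem1 : ∀ j : Int, j ∈ live1 ↔
      (0 ≤ j ∧ j < (people.length : Int) ∧ 0 < PySem.List.pyGetD people j 0 ∧
       PySem.List.pyGetD visited' j false = false))
    (hpre' : ∀ j : Int, 0 ≤ j → j < i + 1 → PySem.List.pyGetD visited' j false = true)
    (hpos' : ∀ j : Int, i + 1 ≤ j → PySem.List.pyGetD visited' j false = true →
      0 < PySem.List.pyGetD people j 0) :
    (solB_boat people limit (PySem.List.pyGetD people i 0) live1 cnt).2 = cnt + 1 ∧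
    pvInv people (i + 1)
      (match (solA_inner people limit visited' i (people.length : Int)).2 with
        | some m => if m ≠ 0 then PySem.List.pySetD visited' m true else visited'
        | none => visited')
      (solB_boat people limit (PySem.List.pyGetD people i 0) live1 cnt).1 := by
  have hnodup1 : live1.Nodup := pv_nodup_of_pairwise people live1 hpair1
  obtain ⟨hp0, hpl, hpz, hps⟩ := pv_partner people limit i visited' live1 h0 hn hlen'
    hpair1 (by intro j; unfold pvW; exact hmem1 j) hpre'
  unfold pvW at hp0 hpl hpz hps
  unfold solB_boat
  dsimp only
  unfold pvInv pvW
  by_cases hpcase : solB_countLe live1 people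
      (limit - PySem.List.pyGetD people i 0) 0 (live1.length : Int) = 0
  · -- no fitting partner on either side
    rw [hpz hpcase, if_neg (by omega)]
    exact ⟨rfl, hlen', hpair1, hmem1, hpre', hpos'⟩
  · -- both sides seat live1[p-1]
    obtain ⟨t, ht, htp, hr2, hgt⟩ := hps hpcase
    rw [hr2, if_pos hpcase]
    dsimp only
    rw [if_pos (show live1[t] ≠ 0 by omega)]
    rw [pv_pop_eraseIdx live1 _ (by omega) (by omega),
        show (solB_countLe live1 people (limit - PySem.List.pyGetD people i 0) 0
          (live1.length : Int) - 1).toNat = t by omega]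
    have hmemt : live1[t] ∈ live1 := List.getElem_mem ht
    have hmt := (hmem1 _).mp hmemt
    have hget2 : ∀ j : Int, 0 ≤ j →
        PySem.List.pyGetD (PySem.List.pySetD visited' live1[t] true) j false =
        if j = live1[t] then true else PySem.List.pyGetD visited' j false := by
      intro j hj
      exact pv_getD_setD visited' live1[t] true false (by omega) (by omega) j hj
    refine ⟨rfl, ?_, ?_, ?_, ?_, ?_⟩
    · rw [PySem.List.pySetD_of_nonneg visited' true (by omega)]
      simp [hlen']
    · exact List.Pairwise.sublist (List.eraseIdx_sublist live1 t) hpair1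
    · intro j
      rw [pv_mem_eraseIdx live1 hnodup1 t ht j]
      constructor
      · rintro ⟨hjl, hjne⟩
        have hj := (hmem1 j).mp hjl
        refine ⟨hj.1, hj.2.1, hj.2.2.1, ?_⟩
        rw [hget2 j hj.1, if_neg hjne]
        exact hj.2.2.2
      · rintro ⟨hj0, hjn, hjw, hjv⟩
        by_cases hje : j = live1[t]
        · rw [hget2 j hj0, if_pos hje] at hjv
          exact absurd hjv (by simp)
        · rw [hget2 j hj0, if_neg hje] at hjv
          exact ⟨(hmem1 j).mpr ⟨hj0, hjn, hjw, hjv⟩, hje⟩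
    · intro j hj0 hj1
      rw [hget2 j hj0]
      by_cases hje : j = live1[t]
      · simp [hje]
      · rw [if_neg hje]
        exact hpre' j hj0 hj1
    · intro j hj hv
      rw [hget2 j (by omega)] at hv
      by_cases hje : j = live1[t]
      · rw [hje]
        exact hmt.2.2.1
      · rw [if_neg hje] at hv
        exact hpos' j hj hv

theorem pv_step (people : List Int) (limit i : Int) (visited : List Bool)
    (live : List Int) (cnt : Int) (h0 : 0 ≤ i) (hn : i < (people.length : Int))
    (hI : pvInv people i visited live) :
    (solA_step people limit (visited, cnt) i).2 = (solB_step people limit (live, cnt) i).2 ∧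
    pvInv people (i + 1) (solA_step people limit (visited, cnt) i).1
      (solB_step people limit (live, cnt) i).1 := by
  obtain ⟨hlen, hpair, hmem, hpre, hpos⟩ := hI
  unfold pvW at hmem hpos
  have hnodup := pv_nodup_of_pairwise people live hpair
  unfold solA_step solB_step
  dsimp only
  by_cases hva : PySem.List.pyGetD visited i false = true
  · -- i was already taken aboard: both sides skip
    rw [if_pos hva]
    have hw : 0 < PySem.List.pyGetD people i 0 := hpos i le_rfl hva
    rw [if_pos hw]
    have hnl : i ∉ live := by
      intro hmm
      have h1 := ((hmem i).mp hmm).2.2.2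
      rw [hva] at h1
      exact absurd h1 (by simp)
    obtain ⟨hk0, hkl, hkiff⟩ := solB_find_spec live people
      (PySem.List.pyGetD people i 0) i hpair ((live.length : Int) - 0).toNat 0
      (live.length : Int) rfl (by omega) (by omega) (by omega)
      (by intro q hq hql; omega) (by intro r h1 h2; omega)
    rw [if_neg (by
      rintro ⟨hkl2, hkeq⟩
      rw [pv_getD_elem live 0 _ hk0 hkl2] at hkeq
      exact hnl (hkeq ▸ List.getElem_mem (by omega)))]
    refine ⟨rfl, ?_⟩
    unfold pvInv pvW
    refine ⟨hlen, hpair, hmem, ?_, ?_⟩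
    · intro j hj0 hj1
      by_cases hje : j = i
      · rw [hje]; exact hva
      · exact hpre j hj0 (by omega)
    · intro j hj hv
      exact hpos j (by omega) hv
  · -- i leads a new boat
    rw [if_neg hva]
    have hvaf : PySem.List.pyGetD visited i false = false := by
      revert hva
      cases PySem.List.pyGetD visited i false <;> simp
    have hvi : i < (visited.length : Int) := by omega
    have hget' : ∀ j : Int, 0 ≤ j →
        PySem.List.pyGetD (PySem.List.pySetD visited i true) j false =
        if j = i then true else PySem.List.pyGetD visited j false :=
      fun j hj => pv_getD_setD visited i true false h0 hvi j hj
    have hlen' : (PySem.List.pySetD visited i true).length = people.length := by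
      rw [PySem.List.pySetD_of_nonneg visited true h0]
      simp [hlen]
    have hpre' : ∀ j : Int, 0 ≤ j → j < i + 1 →
        PySem.List.pyGetD (PySem.List.pySetD visited i true) j false = true := by
      intro j hj0 hj1
      rw [hget' j hj0]
      by_cases hje : j = i
      · simp [hje]
      · rw [if_neg hje]
        exact hpre j hj0 (by omega)
    have hpos' : ∀ j : Int, i + 1 ≤ j →
        PySem.List.pyGetD (PySem.List.pySetD visited i true) j false = true →
        0 < PySem.List.pyGetD people j 0 := by
      intro j hj hv
      rw [hget' j (by omega), if_neg (by omega)] at hv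
      exact hpos j (by omega) hv
    by_cases hw : 0 < PySem.List.pyGetD people i 0
    · -- i is still in live: pop it, then seat its partner
      rw [if_pos hw]
      have hmemi : i ∈ live := (hmem i).mpr ⟨h0, hn, hw, hvaf⟩
      obtain ⟨u, hu, huk, hui⟩ := pv_find_locates people live i hpair hmemi
      have hkl : solB_find live people (PySem.List.pyGetD people i 0) i 0
          (live.length : Int) < (live.length : Int) := by omega
      have hkeq : PySem.List.pyGetD live (solB_find live people
          (PySem.List.pyGetD people i 0) i 0 (live.length : Int)) 0 = i := by
        rw [← huk, pv_getD_nat live u hu]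
        exact hui
      rw [if_pos ⟨hkl, hkeq⟩,
          pv_pop_eraseIdx live _ (by omega) hkl]
      have hktn : (solB_find live people (PySem.List.pyGetD people i 0) i 0
          (live.length : Int)).toNat = u := by omega
      rw [hktn]
      have hlive1 : ∀ j : Int, j ∈ live.eraseIdx u ↔
          (0 ≤ j ∧ j < (people.length : Int) ∧ 0 < PySem.List.pyGetD people j 0 ∧
           PySem.List.pyGetD (PySem.List.pySetD visited i true) j false = false) := by
        intro j
        rw [pv_mem_eraseIdx live hnodup u hu j, hui]
        constructor
        · rintro ⟨hjl, hjne⟩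
          have hold := (hmem j).mp hjl
          refine ⟨hold.1, hold.2.1, hold.2.2.1, ?_⟩
          rw [hget' j hold.1, if_neg hjne]
          exact hold.2.2.2
        · rintro ⟨hj0, hjn, hjw, hjv⟩
          have hjne : j ≠ i := by
            intro he
            rw [he, hget' i h0, if_pos rfl] at hjv
            exact absurd hjv (by simp)
          rw [hget' j hj0, if_neg hjne] at hjv
          exact ⟨(hmem j).mpr ⟨hj0, hjn, hjw, hjv⟩, hjne⟩
      have hb := pv_boat people limit i (PySem.List.pySetD visited i true)
        (live.eraseIdx u) cnt h0 hn hlen'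
        (List.Pairwise.sublist (List.eraseIdx_sublist live u) hpair)
        hlive1 hpre' hpos'
      exact ⟨hb.1.symm, hb.2⟩
    · -- i has nonpositive weight: it was never in live
      rw [if_neg hw]
      have hmemni : i ∉ live := by
        intro hmm
        exact hw ((hmem i).mp hmm).2.2.1
      have hlive1 : ∀ j : Int, j ∈ live ↔
          (0 ≤ j ∧ j < (people.length : Int) ∧ 0 < PySem.List.pyGetD people j 0 ∧
           PySem.List.pyGetD (PySem.List.pySetD visited i true) j false = false) := by
        intro j
        by_cases hje : j = i
        · subst hje
          constructor
          · intro hmm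
            exact absurd hmm hmemni
          · rintro ⟨_, _, hjw, _⟩
            exact absurd hjw hw
        · constructor
          · intro hjl
            have hold := (hmem j).mp hjl
            refine ⟨hold.1, hold.2.1, hold.2.2.1, ?_⟩
            rw [hget' j hold.1, if_neg hje]
            exact hold.2.2.2
          · rintro ⟨hj0, hjn, hjw, hjv⟩
            rw [hget' j hj0, if_neg hje] at hjv
            exact (hmem j).mpr ⟨hj0, hjn, hjw, hjv⟩
      have hb := pv_boat people limit i (PySem.List.pySetD visited i true)
        live cnt h0 hn hlen' hpair hlive1 hpre' hpos'
      exact ⟨hb.1.symm, hb.2⟩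

-- ---- the coupled loop ----

theorem pv_loop (people : List Int) (limit : Int) :
    ∀ (k : Nat) (i : Int), 0 ≤ i → ((people.length : Int) - i).toNat = k →
    ∀ (visited : List Bool) (live : List Int) (cnt : Int),
    pvInv people i visited live →
    ((PySem.List.pyRange i (people.length : Int) 1).foldl (solA_step people limit)
      (visited, cnt)).2 =
    ((PySem.List.pyRange i (people.length : Int) 1).foldl (solB_step people limit)
      (live, cnt)).2 := by
  intro k
  induction k with
  | zero =>
    intro i h0 hk visited live cnt _
    rw [PySem.List.pyRange_one_eq_nil (by omega)]
    rfl
  | succ k IH =>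
    intro i h0 hk visited live cnt hI
    have hin : i < (people.length : Int) := by omega
    rw [PySem.List.pyRange_one_cons (by omega)]
    simp only [List.foldl_cons]
    obtain ⟨hcnt, hinv⟩ := pv_step people limit i visited live cnt h0 hin hI
    rw [← Prod.mk.eta (p := solA_step people limit (visited, cnt) i),
        ← Prod.mk.eta (p := solB_step people limit (live, cnt) i), ← hcnt]
    exact IH (i + 1) (by omega) (by omega) _ _ _ hinv

-- ===== VERDICT (by name: the statement is the Claim_ definition above) =====
theorem solution_spec : Claim_equal_solution := by
  intro people limit _
  unfold Spec_solution solution solution_alt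
  exact pv_loop people limit (people.length) 0 le_rfl (by omega) _ _ 0 (pv_init people)
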